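-- pv_equiv track=rewrite | github.com/VeronikaNguyen/AdventOfCode2021 | day02/functions.py | multiply_depth_position
-- ===== SOURCE A (Python) =====
-- from typing import List
--
-- def multiply_depth_position(commands: List[List[str]]) -> int:
--     depth, position = 0, 0
--     for command in commands:
--         if command[0] == "forward":
--             position += int(command[1])
--         elif command[0] == "down":
--             depth += int(command[1])
--         elif command[0] == "up":
--             depth -= int(command[1])
--     return depth * position
-- ===== SOURCE B (Python) =====
-- from typing import List
--
-- def multiply_depth_position(commands: List[List[str]]) -> int:
--     position = sum(int(c[1]) for c in commands if c[0] == "forward")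
--     depth = (sum(int(c[1]) for c in commands if c[0] == "down")
--              - sum(int(c[1]) for c in commands if c[0] == "up"))
--     return depth * position
-- ===== Notes on version B (the rewrite author's own statement) =====
-- stated objective: simpler
-- what changed: Replaces the single branched accumulator loop by three filtered generator sums (forward / down / up), combining them arithmetically at the end.
import Mathlib
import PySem

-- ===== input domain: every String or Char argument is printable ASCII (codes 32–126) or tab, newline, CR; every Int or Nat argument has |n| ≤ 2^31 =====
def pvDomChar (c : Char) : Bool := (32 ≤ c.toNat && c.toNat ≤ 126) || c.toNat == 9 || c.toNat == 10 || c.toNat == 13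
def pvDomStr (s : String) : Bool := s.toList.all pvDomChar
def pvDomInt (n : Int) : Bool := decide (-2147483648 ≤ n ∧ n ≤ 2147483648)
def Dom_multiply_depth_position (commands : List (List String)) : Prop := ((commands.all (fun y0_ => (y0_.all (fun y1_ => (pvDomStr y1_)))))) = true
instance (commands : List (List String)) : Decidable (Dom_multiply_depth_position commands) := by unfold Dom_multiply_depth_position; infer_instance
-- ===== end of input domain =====

-- B replaces A's single branched accumulator loop by three filtered sums combined at the end (objective: simpler).

-- ===== PORT A =====
-- one step of A's for-loop over the (depth, position) state; pyGet?/ofStr? are none exactly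
-- where Python raises (excluded by Pre_), the .getD 0 there is never reached inside Pre_
def pvAStep (st : Int × Int) (c : List String) : Int × Int :=
  if PySem.List.pyGet? c 0 = some "forward" then
    (st.1, st.2 + ((PySem.List.pyGet? c 1).bind PySem.Int.ofStr?).getD 0)
  else if PySem.List.pyGet? c 0 = some "down" then
    (st.1 + ((PySem.List.pyGet? c 1).bind PySem.Int.ofStr?).getD 0, st.2)
  else if PySem.List.pyGet? c 0 = some "up" then
    (st.1 - ((PySem.List.pyGet? c 1).bind PySem.Int.ofStr?).getD 0, st.2)
  else st

def multiply_depth_position (commands : List (List String)) : Int :=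
  let st := commands.foldl pvAStep (0, 0)
  st.1 * st.2

-- ===== PORT B =====
-- int(c[1]) of a command; default unreachable inside Pre_
def pvVal (c : List String) : Int :=
  ((PySem.List.pyGet? c 1).bind PySem.Int.ofStr?).getD 0

-- sum of int(c[1]) over the commands whose first word is w
def pvSumOf (w : String) (commands : List (List String)) : Int :=
  ((commands.filter (fun c => PySem.List.pyGet? c 0 == some w)).map pvVal).sum

def multiply_depth_position_alt (commands : List (List String)) : Int :=
  (pvSumOf "down" commands - pvSumOf "up" commands) * pvSumOf "forward" commands

-- ===== PRECONDITION & SPEC =====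
-- Pre_ excludes exactly the commands on which Python raises: an empty command (IndexError on
-- command[0]) and a forward/down/up command whose second entry is missing or not int-parseable
-- (IndexError/ValueError); both A and B raise there.
def Pre_multiply_depth_position (commands : List (List String)) : Prop :=
  (commands.all (fun c =>
    match c with
    | [] => false
    | w :: rest =>
      if w = "forward" ∨ w = "down" ∨ w = "up" then
        match rest.head? with
        | some s => (PySem.Int.ofStr? s).isSome
        | none => false
      else true)) = true
instance (commands : List (List String)) : Decidable (Pre_multiply_depth_position commands) := by
  unfold Pre_multiply_depth_position; infer_instance

def pvWitness_multiply_depth_position : List (List String) :=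
  [["forward", "5"], ["down", "3"], ["up", "1"]]

def Spec_multiply_depth_position (commands : List (List String)) (out : Int) : Prop := out = multiply_depth_position_alt commands
instance (commands : List (List String)) (out : Int) : Decidable (Spec_multiply_depth_position commands out) := by unfold Spec_multiply_depth_position; infer_instance

-- ===== CLAIM (what is proved, stated in full; the proofs are below) =====
def Claim_equal_multiply_depth_position : Prop := ∀ (commands : List (List String)), Dom_multiply_depth_position commands → Pre_multiply_depth_position commands → Spec_multiply_depth_position commands (multiply_depth_position commands)

-- ===== LEMMAS AND PROOFS =====

lemma pvFoldl_eq (commands : List (List String)) : ∀ (st : Int × Int),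
    commands.foldl pvAStep st =
      (st.1 + pvSumOf "down" commands - pvSumOf "up" commands,
       st.2 + pvSumOf "forward" commands) := by
  induction commands with
  | nil => intro st; simp [pvSumOf]
  | cons c cs ih =>
    intro st
    simp only [List.foldl_cons, ih]
    unfold pvAStep pvSumOf
    by_cases hf : PySem.List.pyGet? c 0 = some "forward"
    · simp [hf, pvVal]; ring
    · by_cases hd : PySem.List.pyGet? c 0 = some "down"
      · simp [hd, pvVal]; ring
      · by_cases hu : PySem.List.pyGet? c 0 = some "up"
        · simp [hf, hu, pvVal]; ring
        · simp [hf, hd, hu]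

-- ===== VERDICT (by name: the statement is the Claim_ definition above) =====
theorem multiply_depth_position_spec : Claim_equal_multiply_depth_position := by
  intro commands _ _
  unfold Spec_multiply_depth_position multiply_depth_position multiply_depth_position_alt
  simp only [pvFoldl_eq]
  ring
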